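-- pv_equiv track=rewrite | github.com/natanfagundes/pdf_teste | main.py | _agrupar_regioes
-- ===== SOURCE A (Python) =====
-- def _agrupar_regioes(regioes_pt, tolerancia=8):
--     """Une retangulos proximos iterativamente ate estabilizar.
--     Cada regiao: (x0, y0, x1, y1, meta) onde meta e dict."""
--     grupos = list(regioes_pt)
--     mudou = True
--     while mudou:
--         mudou = False
--         novos = []
--         usado = [False] * len(grupos)
--         for i, g in enumerate(grupos):
--             if usado[i]:
--                 continue
--             x0, y0, x1, y1, meta = g
--             usado[i] = True
--             for j in range(i + 1, len(grupos)):
--                 if usado[j]: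
--                     continue
--                 gx0, gy0, gx1, gy1, _ = grupos[j]
--                 # Verifica sobreposicao com tolerancia
--                 if (gx0 <= x1 + tolerancia and gx1 >= x0 - tolerancia and
--                         gy0 <= y1 + tolerancia and gy1 >= y0 - tolerancia):
--                     x0 = min(x0, gx0); y0 = min(y0, gy0)
--                     x1 = max(x1, gx1); y1 = max(y1, gy1)
--                     usado[j] = True
--                     mudou = True
--             novos.append((x0, y0, x1, y1, meta))
--         grupos = novos
--     return grupos
-- ===== SOURCE B (Python) =====
-- def _first_overlap(grupos, tolerancia):
--     """Indices (i, j), i < j, of the first pair of groups whose boxes are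
--     within tolerancia of each other, or None if no such pair exists."""
--     for i in range(len(grupos)):
--         x0, y0, x1, y1, _ = grupos[i]
--         for j in range(i + 1, len(grupos)):
--             gx0, gy0, gx1, gy1, _ = grupos[j]
--             if (gx0 <= x1 + tolerancia and gx1 >= x0 - tolerancia and
--                     gy0 <= y1 + tolerancia and gy1 >= y0 - tolerancia):
--                 return (i, j)
--     return None
--
--
-- def _agrupar_regioes(regioes_pt, tolerancia=8):
--     """Une retangulos proximos ate estabilizar: funde repetidamente o PRIMEIRO
--     par de caixas proximas (passo elementar de reescrita).  O passo e
--     terminante e confluente (propriedade do diamante: caixas so crescem, logo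
--     sobreposicoes persistem), entao a forma normal e a mesma que a do esquema
--     multi-passadas original."""
--     grupos = list(regioes_pt)
--     while True:
--         par = _first_overlap(grupos, tolerancia)
--         if par is None:
--             return grupos
--         i, j = par
--         x0, y0, x1, y1, meta = grupos[i]
--         gx0, gy0, gx1, gy1, _ = grupos.pop(j)
--         grupos[i] = (min(x0, gx0), min(y0, gy0),
--                      max(x1, gx1), max(y1, gy1), meta)
-- ===== Notes on version B (the rewrite author's own statement) =====
-- stated objective: simpler
-- what changed: A's multi-pass scheme (each pass scans with a 'usado' boolean array, absorbs later rectangles into a running box, rebuilds 'novos', and repeats while a 'mudou' flag is set) is replaced by a single-step rewrite loop: repeatedly find the FIRST overlapping pair of groups and merge it in place, stopping when no pair overlaps; merging is terminating and has the diamond property (boxes only grow, so overlaps persist), hence every maximal merge sequence - A's and B's - reaches the same unique normal form.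
import Mathlib
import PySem

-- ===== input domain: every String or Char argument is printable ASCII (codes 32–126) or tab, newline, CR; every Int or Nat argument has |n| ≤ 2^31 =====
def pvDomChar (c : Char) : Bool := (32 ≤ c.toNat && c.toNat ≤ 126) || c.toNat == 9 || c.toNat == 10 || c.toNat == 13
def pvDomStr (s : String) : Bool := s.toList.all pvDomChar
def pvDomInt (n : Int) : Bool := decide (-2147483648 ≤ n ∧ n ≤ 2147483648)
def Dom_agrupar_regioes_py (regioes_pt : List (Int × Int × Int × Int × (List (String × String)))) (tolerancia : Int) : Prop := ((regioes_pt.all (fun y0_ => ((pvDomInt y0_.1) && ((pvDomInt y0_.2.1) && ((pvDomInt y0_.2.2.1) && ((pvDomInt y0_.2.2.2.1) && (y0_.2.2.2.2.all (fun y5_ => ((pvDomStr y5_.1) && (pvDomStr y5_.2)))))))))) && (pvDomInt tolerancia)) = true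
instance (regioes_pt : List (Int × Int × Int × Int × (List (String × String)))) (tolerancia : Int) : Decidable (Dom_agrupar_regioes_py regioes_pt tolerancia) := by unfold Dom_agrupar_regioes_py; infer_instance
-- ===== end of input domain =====

-- B replaces A's multi-pass scan (usado array, running box, mudou flag) by a single-step
-- rewrite loop: repeatedly merge the FIRST overlapping pair of groups until none overlaps.
-- Same result (merging is terminating and has the diamond property, so the normal form is
-- unique); objective: simpler.

abbrev PVR := Int × Int × Int × Int × (List (String × String))

-- the overlap-with-tolerance test (identical condition in both Pythons)
def pvOvl (tol x0 y0 x1 y1 gx0 gy0 gx1 gy1 : Int) : Bool :=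
  decide (gx0 ≤ x1 + tol) && decide (gx1 ≥ x0 - tol) &&
  decide (gy0 ≤ y1 + tol) && decide (gy1 ≥ y0 - tol)

-- ===== PORT A =====
-- body of A's inner `for j in range(i+1, len(grupos))` loop
def pvInnerStep (grupos : List PVR) (tol : Int)
    (st : (Int × Int × Int × Int) × List Bool × Bool) (j : Nat) :
    (Int × Int × Int × Int) × List Bool × Bool :=
  if st.2.1.getD j false then st
  else
    match grupos[j]? with
    | none => st
    | some (gx0, gy0, gx1, gy1, _) =>
      if pvOvl tol st.1.1 st.1.2.1 st.1.2.2.1 st.1.2.2.2 gx0 gy0 gx1 gy1 then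
        ((min st.1.1 gx0, min st.1.2.1 gy0, max st.1.2.2.1 gx1, max st.1.2.2.2 gy1),
         st.2.1.set j true, true)
      else st

-- A's inner loop over the index list js, state = (bbox, usado, mudou)
def pvInnerA (grupos : List PVR) (tol : Int) (js : List Nat)
    (st : (Int × Int × Int × Int) × List Bool × Bool) :
    (Int × Int × Int × Int) × List Bool × Bool :=
  js.foldl (pvInnerStep grupos tol) st

-- body of A's outer `for i, g in enumerate(grupos)` loop, state = (novos, usado, mudou)
def pvStepA (grupos : List PVR) (tol : Int)
    (st : List PVR × List Bool × Bool) (i : Nat) : List PVR × List Bool × Bool :=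
  if st.2.1.getD i false then st
  else
    match grupos[i]? with
    | none => st
    | some (x0, y0, x1, y1, mt0) =>
      let r := pvInnerA grupos tol (List.range' (i + 1) (grupos.length - (i + 1)))
                 ((x0, y0, x1, y1), st.2.1.set i true, st.2.2)
      (st.1 ++ [(r.1.1, r.1.2.1, r.1.2.2.1, r.1.2.2.2, mt0)], r.2)

-- one body of A's `while mudou` loop: returns (novos, mudou)
def pvPassA (grupos : List PVR) (tol : Int) : List PVR × Bool :=
  let r := (List.range grupos.length).foldl (pvStepA grupos tol)
             ([], List.replicate grupos.length false, false)
  (r.1, r.2.2)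

-- lightweight facts about the inner loop (termination support for A's while loop)
lemma pvInnerA_cons' (grupos : List PVR) (tol : Int) (j : Nat) (js : List Nat)
    (st : (Int × Int × Int × Int) × List Bool × Bool) :
    pvInnerA grupos tol (j :: js) st = pvInnerA grupos tol js (pvInnerStep grupos tol st j) := rfl

lemma pvInnerStep_cases (grupos : List PVR) (tol : Int)
    (st : (Int × Int × Int × Int) × List Bool × Bool) (j : Nat) :
    pvInnerStep grupos tol st j = st ∨
    (∃ b', pvInnerStep grupos tol st j = (b', st.2.1.set j true, true) ∧
      st.2.1.getD j false = false) := by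
  by_cases hu : st.2.1.getD j false = true
  · have hu' : st.2.1[j]?.getD false = true := by
      simpa [List.getD_eq_getElem?_getD] using hu
    exact Or.inl (by simp [pvInnerStep, hu'])
  · rw [Bool.not_eq_true] at hu
    have hu' : st.2.1[j]?.getD false = false := by
      simpa [List.getD_eq_getElem?_getD] using hu
    rcases hg : grupos[j]? with _ | g
    · exact Or.inl (by simp [pvInnerStep, hu', hg])
    · obtain ⟨gx0, gy0, gx1, gy1, mg⟩ := g
      by_cases hov : pvOvl tol st.1.1 st.1.2.1 st.1.2.2.1 st.1.2.2.2 gx0 gy0 gx1 gy1 = true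
      · exact Or.inr ⟨(min st.1.1 gx0, min st.1.2.1 gy0, max st.1.2.2.1 gx1, max st.1.2.2.2 gy1),
          by simp [pvInnerStep, hu', hg, hov], hu⟩
      · exact Or.inl (by simp [pvInnerStep, hu', hg, hov])

lemma pvInnerA_len (grupos : List PVR) (tol : Int) :
    ∀ (js : List Nat) (st : (Int × Int × Int × Int) × List Bool × Bool),
      (pvInnerA grupos tol js st).2.1.length = st.2.1.length := by
  intro js
  induction js with
  | nil => intro st; rfl
  | cons j js ih =>
    intro st
    rw [pvInnerA_cons', ih]
    rcases pvInnerStep_cases grupos tol st j with h | ⟨b', h, _⟩ <;> simp [h]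

lemma pvInnerA_facts (grupos : List PVR) (tol : Int) :
    ∀ (js : List Nat) (b : Int × Int × Int × Int) (u : List Bool) (m : Bool),
      (∀ j ∈ js, j < u.length) →
      (∀ k, u.getD k false = true →
        (pvInnerA grupos tol js (b, u, m)).2.1.getD k false = true) ∧
      (m = true → (pvInnerA grupos tol js (b, u, m)).2.2 = true) ∧
      ((pvInnerA grupos tol js (b, u, m)).2.2 = true → m = true ∨
        ∃ j ∈ js, u.getD j false = false ∧
          (pvInnerA grupos tol js (b, u, m)).2.1.getD j false = true) := by
  intro js
  induction js with
  | nil => intro b u m _; exact ⟨fun k h => h, fun h => h, fun h => Or.inl h⟩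
  | cons j js ih =>
    intro b u m hlt
    have hjlt : j < u.length := hlt j (List.mem_cons_self ..)
    have hlt' : ∀ j' ∈ js, j' < u.length := fun j' h => hlt j' (List.mem_cons_of_mem _ h)
    rw [pvInnerA_cons']
    rcases pvInnerStep_cases grupos tol (b, u, m) j with h | ⟨b', h, hf⟩
    · rw [h]
      obtain ⟨h1, h2, h3⟩ := ih b u m hlt'
      refine ⟨h1, h2, fun hh => ?_⟩
      rcases h3 hh with hm | ⟨j', hj', hf', ht'⟩
      · exact Or.inl hm
      · exact Or.inr ⟨j', List.mem_cons_of_mem _ hj', hf', ht'⟩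
    · rw [h]
      have hlt2 : ∀ j' ∈ js, j' < (u.set j true).length := by simpa using hlt'
      obtain ⟨h1, h2, h3⟩ := ih b' (u.set j true) true hlt2
      have hmono : ∀ k, u.getD k false = true → (u.set j true).getD k false = true := by
        intro k hk
        by_cases hkj : j = k
        · subst hkj
          rw [List.getD_eq_getElem?_getD, List.getElem?_set_self hjlt]
          rfl
        · rw [List.getD_eq_getElem?_getD, List.getElem?_set_ne hkj,
              ← List.getD_eq_getElem?_getD]
          exact hk
      refine ⟨fun k hk => h1 k (hmono k hk), fun _ => h2 rfl, fun _ => ?_⟩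
      refine Or.inr ⟨j, List.mem_cons_self .., hf, ?_⟩
      apply h1
      rw [List.getD_eq_getElem?_getD, List.getElem?_set_self hjlt]
      rfl

-- counting unused indices
lemma pvCount_mono (js : List Nat) (u u' : List Bool)
    (hm : ∀ k, u.getD k false = true → u'.getD k false = true) :
    js.countP (fun j => !(u'.getD j false)) ≤ js.countP (fun j => !(u.getD j false)) := by
  apply List.countP_mono_left
  intro j _ hj
  rw [Bool.not_eq_eq_eq_not] at hj ⊢
  rcases hval : u.getD j false with _ | _
  · rfl
  · rw [hm j hval] at hj
    exact hj

lemma pvCount_strict (js : List Nat) (u u' : List Bool)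
    (hm : ∀ k, u.getD k false = true → u'.getD k false = true) :
    ∀ j ∈ js, u.getD j false = false → u'.getD j false = true →
    js.countP (fun j => !(u'.getD j false)) < js.countP (fun j => !(u.getD j false)) := by
  induction js with
  | nil => intro j h; exact absurd h (List.not_mem_nil)
  | cons a js ih =>
    intro j hj hf ht
    rw [List.countP_cons, List.countP_cons]
    rcases List.mem_cons.mp hj with rfl | hmem
    · have h1 : (!(u'.getD j false)) = false := by rw [ht]; rfl
      have h2 : (!(u.getD j false)) = true := by rw [hf]; rfl
      rw [h1, h2, if_neg (by decide : ¬((false : Bool) = true)),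
          if_pos (by decide : (true : Bool) = true)]
      have := pvCount_mono js u u' hm
      omega
    · have hlt := ih j hmem hf ht
      have hhead : (if (!(u'.getD a false)) = true then 1 else 0) ≤
          (if (!(u.getD a false)) = true then 1 else 0) := by
        rcases hval : u.getD a false with _ | _
        · split_ifs <;> simp_all
        · rw [hm a hval]
      omega

lemma pvFoldA_bound (grupos : List PVR) (tol : Int) :
    ∀ (c k : Nat) (acc : List PVR) (u : List Bool) (m : Bool),
    k + c = grupos.length → u.length = grupos.length →
    (((List.range' k c).foldl (pvStepA grupos tol) (acc, u, m)).1.length +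
      (if m = false ∧ ((List.range' k c).foldl (pvStepA grupos tol) (acc, u, m)).2.2 = true
        then 1 else 0)
      ≤ acc.length + (List.range' k c).countP (fun j => !(u.getD j false))) ∧
    (m = true → ((List.range' k c).foldl (pvStepA grupos tol) (acc, u, m)).2.2 = true) := by
  intro c
  induction c with
  | zero =>
    intro k acc u m _ _
    simp only [List.range', List.foldl_nil, List.countP_nil]
    exact ⟨by split_ifs with h <;> simp_all, fun h => h⟩
  | succ c ih =>
    intro k acc u m hk hu
    have hkl : k < grupos.length := by omega
    rw [List.range'_succ, List.foldl_cons, List.countP_cons]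
    by_cases hused : u.getD k false = true
    · have hused' : u[k]?.getD false = true := by
        simpa [List.getD_eq_getElem?_getD] using hused
      have hstep : pvStepA grupos tol (acc, u, m) k = (acc, u, m) := by
        simp [pvStepA, hused']
      have hcnt : (!(u.getD k false)) = false := by rw [hused]; rfl
      rw [hstep, hcnt, if_neg (by decide : ¬((false : Bool) = true))]
      obtain ⟨hb, hmono⟩ := ih (k + 1) acc u m (by omega) hu
      exact ⟨by simpa using hb, hmono⟩
    · rw [Bool.not_eq_true] at hused
      have hused' : u[k]?.getD false = false := by
        simpa [List.getD_eq_getElem?_getD] using hused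
      have hcnt : (!(u.getD k false)) = true := by rw [hused]; rfl
      rw [hcnt, if_pos (by decide : (true : Bool) = true)]
      rcases hg : grupos[k]? with _ | g
      · exact absurd hg (by simp [List.getElem?_eq_getElem hkl])
      · obtain ⟨x0, y0, x1, y1, mt⟩ := g
        have hc : grupos.length - (k + 1) = c := by omega
        have hstep : pvStepA grupos tol (acc, u, m) k =
            (acc ++ [((pvInnerA grupos tol (List.range' (k + 1) c)
                        ((x0, y0, x1, y1), u.set k true, m)).1.1,
                      (pvInnerA grupos tol (List.range' (k + 1) c)
                        ((x0, y0, x1, y1), u.set k true, m)).1.2.1,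
                      (pvInnerA grupos tol (List.range' (k + 1) c)
                        ((x0, y0, x1, y1), u.set k true, m)).1.2.2.1,
                      (pvInnerA grupos tol (List.range' (k + 1) c)
                        ((x0, y0, x1, y1), u.set k true, m)).1.2.2.2, mt)],
             (pvInnerA grupos tol (List.range' (k + 1) c)
                        ((x0, y0, x1, y1), u.set k true, m)).2) := by
          simp [pvStepA, hused', hg, hc]
        rw [hstep]
        have hlt : ∀ j ∈ List.range' (k + 1) c, j < (u.set k true).length := by
          intro j hj
          rw [List.mem_range'_1] at hj
          simp only [List.length_set]
          omega
        obtain ⟨i1, i2, i3⟩ := pvInnerA_facts grupos tol (List.range' (k + 1) c)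
          (x0, y0, x1, y1) (u.set k true) m hlt
        set r := pvInnerA grupos tol (List.range' (k + 1) c) ((x0, y0, x1, y1), u.set k true, m)
          with hr
        have hrlen : r.2.1.length = grupos.length := by
          rw [hr, pvInnerA_len]
          simpa using hu
        have hmono_u : ∀ kk, u.getD kk false = true → r.2.1.getD kk false = true := by
          intro kk hkk
          apply i1
          by_cases hkj : k = kk
          · subst hkj
            rw [List.getD_eq_getElem?_getD, List.getElem?_set_self (by omega)]
            rfl
          · rw [List.getD_eq_getElem?_getD, List.getElem?_set_ne hkj,
                ← List.getD_eq_getElem?_getD]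
            exact hkk
        obtain ⟨hb, hmono⟩ := ih (k + 1)
          (acc ++ [(r.1.1, r.1.2.1, r.1.2.2.1, r.1.2.2.2, mt)]) r.2.1 r.2.2 (by omega) hrlen
        rw [show ((r.2.1, r.2.2) : List Bool × Bool) = r.2 from rfl] at hb hmono
        refine ⟨?_, fun hm => hmono (i2 hm)⟩
        simp only [List.length_append, List.length_cons, List.length_nil] at hb
        have hcm := pvCount_mono (List.range' (k + 1) c) u r.2.1 hmono_u
        by_cases hrm : r.2.2 = true
        · have hres : (List.foldl (pvStepA grupos tol)
              (acc ++ [(r.1.1, r.1.2.1, r.1.2.2.1, r.1.2.2.2, mt)], r.2)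
              (List.range' (k + 1) c)).2.2 = true := hmono hrm
          rw [if_neg (by simp [hrm])] at hb
          rcases i3 hrm with hm | ⟨j, hj, hf, ht⟩
          · -- m was already true: no indicator on the outer side either
            rw [if_neg (by simp [hm])]
            omega
          · -- a new absorption: the unused count strictly drops
            have hjne : j ≠ k := by
              rw [List.mem_range'_1] at hj
              omega
            have hfu : u.getD j false = false := by
              rw [List.getD_eq_getElem?_getD] at hf ⊢
              rw [List.getElem?_set_ne (show k ≠ j from fun h => hjne h.symm)] at hf
              exact hf
            have hstrict := pvCount_strict (List.range' (k + 1) c) u r.2.1 hmono_u j hj hfu ht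
            by_cases hm2 : m = true
            · rw [if_neg (by simp [hm2])]
              omega
            · rw [Bool.not_eq_true] at hm2
              rw [if_pos ⟨hm2, hmono hrm⟩]
              omega
        · -- the inner loop did not absorb, so m = false as well
          have hrm' : r.2.2 = false := by simpa using hrm
          have hml : m = false := by
            by_cases h : m = true
            · exact absurd (i2 h) hrm
            · simpa using h
          by_cases hres : (List.foldl (pvStepA grupos tol)
              (acc ++ [(r.1.1, r.1.2.1, r.1.2.2.1, r.1.2.2.2, mt)], r.2)
              (List.range' (k + 1) c)).2.2 = true
          · rw [if_pos ⟨hml, hres⟩]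
            rw [if_pos ⟨hrm', hres⟩] at hb
            omega
          · rw [if_neg (fun h => hres h.2)]
            rw [if_neg (fun h => hres h.2)] at hb
            omega

lemma pvPassA_mudou_lt (grupos : List PVR) (tol : Int) (h : (pvPassA grupos tol).2 = true) :
    (pvPassA grupos tol).1.length < grupos.length := by
  have h' : (List.foldl (pvStepA grupos tol) ([], List.replicate grupos.length false, false)
      (List.range' 0 grupos.length)).2.2 = true := by
    simpa [pvPassA, List.range_eq_range'] using h
  have hgoal : (pvPassA grupos tol).1 = (List.foldl (pvStepA grupos tol)
      ([], List.replicate grupos.length false, false) (List.range' 0 grupos.length)).1 := by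
    simp [pvPassA, List.range_eq_range']
  obtain ⟨hb, _⟩ := pvFoldA_bound grupos tol grupos.length 0 []
    (List.replicate grupos.length false) false (by omega) (by simp)
  rw [if_pos ⟨rfl, h'⟩, List.length_nil] at hb
  have hcnt : (List.range' 0 grupos.length).countP
      (fun j => !((List.replicate grupos.length false).getD j false)) ≤ grupos.length :=
    le_trans List.countP_le_length (by simp)
  rw [hgoal]
  omega

-- A's `while mudou` loop (terminates: a pass that merged something is shorter)
def pvLoopA (tol : Int) (grupos : List PVR) : List PVR :=
  if _h : (pvPassA grupos tol).2 = true then pvLoopA tol (pvPassA grupos tol).1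
  else (pvPassA grupos tol).1
termination_by grupos.length
decreasing_by exact pvPassA_mudou_lt grupos tol _h

def agrupar_regioes_py (regioes_pt : List (Int × Int × Int × Int × (List (String × String)))) (tolerancia : Int) : List (Int × Int × Int × Int × (List (String × String))) :=
  pvLoopA tolerancia regioes_pt

-- ===== PORT B =====
-- _first_overlap: inner `for j in range(i+1, len(grupos))` scan
def pvFindJ (tol : Int) (l : List PVR) (x0 y0 x1 y1 : Int) (j : Nat) : Option Nat :=
  if h : j < l.length then
    -- gx0, gy0, gx1, gy1, _ = grupos[j]
    if pvOvl tol x0 y0 x1 y1 l[j].1 l[j].2.1 l[j].2.2.1 l[j].2.2.2.1 then some j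
    else pvFindJ tol l x0 y0 x1 y1 (j + 1)
  else none
termination_by l.length - j

-- _first_overlap: outer `for i in range(len(grupos))` scan
def pvFindI (tol : Int) (l : List PVR) (i : Nat) : Option (Nat × Nat) :=
  if h : i < l.length then
    -- x0, y0, x1, y1, _ = grupos[i]
    match pvFindJ tol l l[i].1 l[i].2.1 l[i].2.2.1 l[i].2.2.2.1 (i + 1) with
    | some j => some (i, j)
    | none => pvFindI tol l (i + 1)
  else none
termination_by l.length - i

def pvFirstOverlap (tol : Int) (l : List PVR) : Option (Nat × Nat) := pvFindI tol l 0

-- termination support for B's `while True` loop: a found pair is in range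
lemma pvFindJ_some_lt (tol : Int) (l : List PVR) (x0 y0 x1 y1 : Int) :
    ∀ (j j' : Nat), pvFindJ tol l x0 y0 x1 y1 j = some j' → j ≤ j' ∧ j' < l.length := by
  intro j
  induction hn : l.length - j using Nat.strong_induction_on generalizing j with
  | _ n ih =>
    intro j' hfind
    rw [pvFindJ] at hfind
    by_cases h : j < l.length
    · rw [dif_pos h] at hfind
      by_cases hov : pvOvl tol x0 y0 x1 y1 l[j].1 l[j].2.1 l[j].2.2.1 l[j].2.2.2.1 = true
      · simp only [hov, if_true, Option.some.injEq] at hfind; omega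
      · simp only [hov] at hfind
        have := ih (l.length - (j + 1)) (by omega) (j + 1) rfl j' hfind
        omega
    · rw [dif_neg h] at hfind; exact absurd hfind (by simp)

lemma pvFindI_some_lt (tol : Int) (l : List PVR) :
    ∀ (i i' j' : Nat), pvFindI tol l i = some (i', j') → i' < j' ∧ j' < l.length := by
  intro i
  induction hn : l.length - i using Nat.strong_induction_on generalizing i with
  | _ n ih =>
    intro i' j' hfind
    rw [pvFindI] at hfind
    by_cases h : i < l.length
    · rw [dif_pos h] at hfind
      rcases hj : pvFindJ tol l l[i].1 l[i].2.1 l[i].2.2.1 l[i].2.2.2.1 (i + 1) with _ | j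
      · rw [hj] at hfind
        exact ih (l.length - (i + 1)) (by omega) (i + 1) rfl i' j' hfind
      · rw [hj] at hfind
        simp only [Option.some.injEq, Prod.mk.injEq] at hfind
        obtain ⟨h1, h2⟩ := hfind
        have := pvFindJ_some_lt tol l l[i].1 l[i].2.1 l[i].2.2.1 l[i].2.2.2.1 (i + 1) j hj
        omega
    · rw [dif_neg h] at hfind; exact absurd hfind (by simp)

-- B's `while True` loop: merge the first overlapping pair, or stop
def pvLoopB (tol : Int) (grupos : List PVR) : List PVR :=
  match hpar : pvFirstOverlap tol grupos with
  | none => grupos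
  | some (i, j) =>
    let a := grupos[i]?.getD (0, 0, 0, 0, [])
    let b := grupos[j]?.getD (0, 0, 0, 0, [])
    pvLoopB tol ((grupos.eraseIdx j).set i
      (min a.1 b.1, min a.2.1 b.2.1, max a.2.2.1 b.2.2.1, max a.2.2.2.1 b.2.2.2.1, a.2.2.2.2))
termination_by grupos.length
decreasing_by
  have h2 := pvFindI_some_lt tol grupos 0 i j hpar
  simp only [List.length_set, List.length_eraseIdx, if_pos h2.2]
  omega

def agrupar_regioes_py_alt (regioes_pt : List (Int × Int × Int × Int × (List (String × String)))) (tolerancia : Int) : List (Int × Int × Int × Int × (List (String × String))) :=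
  pvLoopB tolerancia regioes_pt

-- ===== PRECONDITION & SPEC =====
def Spec_agrupar_regioes_py (regioes_pt : List (Int × Int × Int × Int × (List (String × String)))) (tolerancia : Int) (out : List (Int × Int × Int × Int × (List (String × String)))) : Prop := out = agrupar_regioes_py_alt regioes_pt tolerancia
instance (regioes_pt : List (Int × Int × Int × Int × (List (String × String)))) (tolerancia : Int) (out : List (Int × Int × Int × Int × (List (String × String)))) : Decidable (Spec_agrupar_regioes_py regioes_pt tolerancia out) := by
  unfold Spec_agrupar_regioes_py
  exact @instDecidableEqList _ (fun x y => instDecidableEqProd x y) out (agrupar_regioes_py_alt regioes_pt tolerancia)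

-- ===== CLAIM (what is proved, stated in full; the proofs are below) =====
def Claim_equal_agrupar_regioes_py : Prop := ∀ (regioes_pt : List (Int × Int × Int × Int × (List (String × String)))) (tolerancia : Int), Dom_agrupar_regioes_py regioes_pt tolerancia → Spec_agrupar_regioes_py regioes_pt tolerancia (agrupar_regioes_py regioes_pt tolerancia)

-- ===== LEMMAS AND PROOFS =====
-- functional characterisation of A's pass (absorb-pass): used to show A's loop is a
-- maximal sequence of merge steps
def pvAbsorb (tol : Int) : (Int × Int × Int × Int) → List PVR → (Int × Int × Int × Int) × List PVR
  | b, [] => (b, [])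
  | (x0, y0, x1, y1), (gx0, gy0, gx1, gy1, m) :: rest =>
    if pvOvl tol x0 y0 x1 y1 gx0 gy0 gx1 gy1 then
      pvAbsorb tol (min x0 gx0, min y0 gy0, max x1 gx1, max y1 gy1) rest
    else
      let r := pvAbsorb tol (x0, y0, x1, y1) rest
      (r.1, (gx0, gy0, gx1, gy1, m) :: r.2)

lemma pvAbsorb_len (tol : Int) : ∀ (rest : List PVR) (b : Int × Int × Int × Int),
    (pvAbsorb tol b rest).2.length ≤ rest.length := by
  intro rest
  induction rest with
  | nil => intro b; simp [pvAbsorb]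
  | cons r rest ih =>
    intro b
    obtain ⟨x0, y0, x1, y1⟩ := b
    obtain ⟨gx0, gy0, gx1, gy1, m⟩ := r
    by_cases h : pvOvl tol x0 y0 x1 y1 gx0 gy0 gx1 gy1 = true
    · simp only [pvAbsorb, h, if_true]
      exact le_trans (ih _) (Nat.le_succ _)
    · simp only [pvAbsorb, h, List.length_cons]
      exact Nat.succ_le_succ (ih _)

def pvPassAbs (tol : Int) : List PVR → List PVR
  | [] => []
  | (x0, y0, x1, y1, mt0) :: rest =>
    let r := pvAbsorb tol (x0, y0, x1, y1) rest
    (r.1.1, r.1.2.1, r.1.2.2.1, r.1.2.2.2, mt0) :: pvPassAbs tol r.2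
termination_by l => l.length
decreasing_by exact Nat.lt_succ_of_le (pvAbsorb_len tol rest (x0, y0, x1, y1))

lemma pvPassAbs_len_le (tol : Int) : ∀ (l : List PVR), (pvPassAbs tol l).length ≤ l.length := by
  intro l
  induction hn : l.length using Nat.strong_induction_on generalizing l with
  | _ n ih =>
    match l with
    | [] => simp [pvPassAbs]
    | (x0, y0, x1, y1, mt0) :: rest =>
      rw [pvPassAbs]
      simp only [List.length_cons] at hn ⊢
      have h1 := pvAbsorb_len tol rest (x0, y0, x1, y1)
      have h2 := ih ((pvAbsorb tol (x0, y0, x1, y1) rest).2.length) (by omega) _ rfl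
      omega

-- the regions at the unused indices of js, in order
def pvSel (grupos : List PVR) (u : List Bool) (js : List Nat) : List PVR :=
  js.filterMap (fun j => if u.getD j false then none else grupos[j]?)

lemma pvSel_set_of_not_mem (grupos : List PVR) (u : List Bool) (k : Nat) (b : Bool)
    (js : List Nat) (h : k ∉ js) : pvSel grupos (u.set k b) js = pvSel grupos u js := by
  induction js with
  | nil => rfl
  | cons j js ih =>
    simp only [List.mem_cons, not_or] at h
    simp only [pvSel, List.filterMap_cons] at ih ⊢
    rw [List.getD_eq_getElem?_getD, List.getElem?_set_ne (by omega), ← List.getD_eq_getElem?_getD,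
        ih h.2]

lemma pvInnerA_cons (grupos : List PVR) (tol : Int) (j : Nat) (js : List Nat)
    (st : (Int × Int × Int × Int) × List Bool × Bool) :
    pvInnerA grupos tol (j :: js) st = pvInnerA grupos tol js (pvInnerStep grupos tol st j) := rfl

lemma pvInnerA_eq (grupos : List PVR) (tol : Int) :
    ∀ (js : List Nat) (b : Int × Int × Int × Int) (u : List Bool) (m : Bool), js.Nodup →
    (∀ j ∈ js, j < u.length) →
    (pvInnerA grupos tol js (b, u, m)).2.1.length = u.length ∧
    (pvInnerA grupos tol js (b, u, m)).1 = (pvAbsorb tol b (pvSel grupos u js)).1 ∧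
    (pvInnerA grupos tol js (b, u, m)).2.2 =
      (m || decide ((pvAbsorb tol b (pvSel grupos u js)).2.length ≠ (pvSel grupos u js).length)) ∧
    (∀ j, j ∉ js → (pvInnerA grupos tol js (b, u, m)).2.1.getD j false = u.getD j false) ∧
    pvSel grupos (pvInnerA grupos tol js (b, u, m)).2.1 js = (pvAbsorb tol b (pvSel grupos u js)).2 := by
  intro js
  induction js with
  | nil =>
    intro b u m _ _
    simp [pvInnerA, pvSel, pvAbsorb]
  | cons j js ih =>
    intro b u m hnd hlt
    rw [List.nodup_cons] at hnd
    obtain ⟨hj, hnd⟩ := hnd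
    have hjlt : j < u.length := hlt j (List.mem_cons_self ..)
    have hlt' : ∀ j' ∈ js, j' < u.length := fun j' h => hlt j' (List.mem_cons_of_mem _ h)
    obtain ⟨x0, y0, x1, y1⟩ := b
    by_cases hu : u.getD j false = true
    · -- index j already used: step skips, j filtered out of the selection
      have hu' : u[j]?.getD false = true := by simpa [List.getD_eq_getElem?_getD] using hu
      have hstep : pvInnerStep grupos tol ((x0, y0, x1, y1), u, m) j = ((x0, y0, x1, y1), u, m) := by
        simp [pvInnerStep, hu']
      have hsel : pvSel grupos u (j :: js) = pvSel grupos u js := by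
        simp [pvSel, hu']
      have := ih (x0, y0, x1, y1) u m hnd hlt'
      rw [pvInnerA_cons, hstep, hsel]
      refine ⟨this.1, this.2.1, this.2.2.1, ?_, ?_⟩
      · intro j' hj'; exact this.2.2.2.1 j' (fun h => hj' (List.mem_cons_of_mem _ h))
      · have huj : (pvInnerA grupos tol js ((x0, y0, x1, y1), u, m)).2.1.getD j false = true := by
          rw [this.2.2.2.1 j hj]; exact hu
        have h5 := this.2.2.2.2
        simp only [pvSel] at h5 ⊢
        simp only [List.getD_eq_getElem?_getD] at huj h5
        simp [huj, h5]
    · rw [Bool.not_eq_true] at hu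
      have hu' : u[j]?.getD false = false := by simpa [List.getD_eq_getElem?_getD] using hu
      match hg : grupos[j]? with
      | none =>
        have hstep : pvInnerStep grupos tol ((x0, y0, x1, y1), u, m) j = ((x0, y0, x1, y1), u, m) := by
          simp [pvInnerStep, hu', hg]
        have hsel : pvSel grupos u (j :: js) = pvSel grupos u js := by
          simp [pvSel, hu', hg]
        have := ih (x0, y0, x1, y1) u m hnd hlt'
        rw [pvInnerA_cons, hstep, hsel]
        refine ⟨this.1, this.2.1, this.2.2.1, ?_, ?_⟩
        · intro j' hj'; exact this.2.2.2.1 j' (fun h => hj' (List.mem_cons_of_mem _ h))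
        · have huj : (pvInnerA grupos tol js ((x0, y0, x1, y1), u, m)).2.1.getD j false = u.getD j false :=
            this.2.2.2.1 j hj
          have h5 := this.2.2.2.2
          simp only [pvSel] at h5 ⊢
          simp only [List.getD_eq_getElem?_getD] at huj h5
          simp [huj, hu', hg, h5]
      | some g =>
        obtain ⟨gx0, gy0, gx1, gy1, mg⟩ := g
        have hsel : pvSel grupos u (j :: js) = (gx0, gy0, gx1, gy1, mg) :: pvSel grupos u js := by
          simp [pvSel, hu', hg]
        by_cases hov : pvOvl tol x0 y0 x1 y1 gx0 gy0 gx1 gy1 = true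
        · -- absorbed: bbox grows, usado[j] := true, mudou := true
          have hstep : pvInnerStep grupos tol ((x0, y0, x1, y1), u, m) j =
              ((min x0 gx0, min y0 gy0, max x1 gx1, max y1 gy1), u.set j true, true) := by
            simp [pvInnerStep, hu', hg, hov]
          have hsel2 : pvSel grupos (u.set j true) js = pvSel grupos u js :=
            pvSel_set_of_not_mem grupos u j true js hj
          have habs : pvAbsorb tol (x0, y0, x1, y1) (pvSel grupos u (j :: js)) =
              pvAbsorb tol (min x0 gx0, min y0 gy0, max x1 gx1, max y1 gy1) (pvSel grupos u js) := by
            rw [hsel]; simp [pvAbsorb, hov]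
          have hlt2 : ∀ j' ∈ js, j' < (u.set j true).length := by
            simpa using hlt'
          have := ih (min x0 gx0, min y0 gy0, max x1 gx1, max y1 gy1) (u.set j true) true hnd hlt2
          rw [hsel2] at this
          rw [pvInnerA_cons, hstep, habs]
          refine ⟨by simpa using this.1, this.2.1, ?_, ?_, ?_⟩
          · rw [this.2.2.1]
            have hle1 := pvAbsorb_len tol (pvSel grupos u js)
              (min x0 gx0, min y0 gy0, max x1 gx1, max y1 gy1)
            rw [hsel]
            simp only [List.length_cons, Bool.true_or]
            have hne : (pvAbsorb tol (min x0 gx0, min y0 gy0, max x1 gx1, max y1 gy1)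
                (pvSel grupos u js)).2.length ≠ (pvSel grupos u js).length + 1 := by omega
            simp [hne]
          · intro j' hj'
            simp only [List.mem_cons, not_or] at hj'
            rw [this.2.2.2.1 j' hj'.2, List.getD_eq_getElem?_getD,
                List.getElem?_set_ne (by omega : j ≠ j'), ← List.getD_eq_getElem?_getD]
          · have huj : (pvInnerA grupos tol js
                ((min x0 gx0, min y0 gy0, max x1 gx1, max y1 gy1), u.set j true, true)).2.1.getD j false = true := by
              rw [this.2.2.2.1 j hj, List.getD_eq_getElem?_getD,
                  List.getElem?_set_self (by omega)]
              rfl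
            have h5 := this.2.2.2.2
            simp only [pvSel] at h5 ⊢
            simp only [List.getD_eq_getElem?_getD] at huj h5
            simp [huj, h5]
        · -- not absorbed: step skips, region kept
          have hstep : pvInnerStep grupos tol ((x0, y0, x1, y1), u, m) j = ((x0, y0, x1, y1), u, m) := by
            simp [pvInnerStep, hu', hg, hov]
          have habs : pvAbsorb tol (x0, y0, x1, y1) (pvSel grupos u (j :: js)) =
              ((pvAbsorb tol (x0, y0, x1, y1) (pvSel grupos u js)).1,
               (gx0, gy0, gx1, gy1, mg) :: (pvAbsorb tol (x0, y0, x1, y1) (pvSel grupos u js)).2) := by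
            rw [hsel]; simp [pvAbsorb, hov]
          have := ih (x0, y0, x1, y1) u m hnd hlt'
          rw [pvInnerA_cons, hstep, habs]
          refine ⟨this.1, this.2.1, ?_, ?_, ?_⟩
          · rw [this.2.2.1, hsel]
            simp only [List.length_cons]
            have hle1 := pvAbsorb_len tol (pvSel grupos u js) (x0, y0, x1, y1)
            by_cases he : (pvAbsorb tol (x0, y0, x1, y1) (pvSel grupos u js)).2.length = (pvSel grupos u js).length
            · simp [he]
            · simp [he]
          · intro j' hj'; exact this.2.2.2.1 j' (fun h => hj' (List.mem_cons_of_mem _ h))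
          · have huj : (pvInnerA grupos tol js ((x0, y0, x1, y1), u, m)).2.1.getD j false = u.getD j false :=
              this.2.2.2.1 j hj
            have h5 := this.2.2.2.2
            simp only [pvSel] at h5 ⊢
            simp only [List.getD_eq_getElem?_getD] at huj h5
            simp [huj, hu', hg, h5]

lemma pvFilterMap_range'_getElem (l : List PVR) :
    ∀ (c k : Nat), k + c = l.length →
    (List.range' k c).filterMap (fun j => l[j]?) = l.drop k := by
  intro c
  induction c with
  | zero =>
    intro k hk
    simp [List.drop_of_length_le (by omega : l.length ≤ k)]
  | succ c ih =>
    intro k hk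
    have hkl : k < l.length := by omega
    rw [List.range'_succ, List.filterMap_cons, List.getElem?_eq_getElem hkl, ih (k + 1) (by omega),
        List.drop_eq_getElem_cons hkl]

lemma pvFoldA_eq (grupos : List PVR) (tol : Int) :
    ∀ (c k : Nat) (acc : List PVR) (u : List Bool) (m : Bool),
    k + c = grupos.length → u.length = grupos.length →
    ((List.range' k c).foldl (pvStepA grupos tol) (acc, u, m)).1
        = acc ++ pvPassAbs tol (pvSel grupos u (List.range' k c)) ∧
    ((List.range' k c).foldl (pvStepA grupos tol) (acc, u, m)).2.2
        = (m || decide ((pvPassAbs tol (pvSel grupos u (List.range' k c))).length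
                        ≠ (pvSel grupos u (List.range' k c)).length)) := by
  intro c
  induction c with
  | zero =>
    intro k acc u m _ _
    simp [pvSel, pvPassAbs]
  | succ c ih =>
    intro k acc u m hk hu
    have hkl : k < grupos.length := by omega
    rw [List.range'_succ, List.foldl_cons]
    have hg : grupos[k]? = some grupos[k] := List.getElem?_eq_getElem hkl
    by_cases hused : u.getD k false = true
    · have hused' : u[k]?.getD false = true := by simpa [List.getD_eq_getElem?_getD] using hused
      have hstep : pvStepA grupos tol (acc, u, m) k = (acc, u, m) := by
        simp [pvStepA, hused']
      have hsel : pvSel grupos u (k :: List.range' (k + 1) c) = pvSel grupos u (List.range' (k + 1) c) := by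
        simp [pvSel, hused']
      rw [hstep, hsel]
      exact ih (k + 1) acc u m (by omega) hu
    · rw [Bool.not_eq_true] at hused
      have hused' : u[k]?.getD false = false := by simpa [List.getD_eq_getElem?_getD] using hused
      rcases hget : grupos[k] with ⟨x0, y0, x1, y1, mt⟩
      rw [hget] at hg
      have hstep : pvStepA grupos tol (acc, u, m) k =
          (acc ++ [((pvInnerA grupos tol (List.range' (k + 1) (grupos.length - (k + 1)))
                      ((x0, y0, x1, y1), u.set k true, m)).1.1,
                    (pvInnerA grupos tol (List.range' (k + 1) (grupos.length - (k + 1)))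
                      ((x0, y0, x1, y1), u.set k true, m)).1.2.1,
                    (pvInnerA grupos tol (List.range' (k + 1) (grupos.length - (k + 1)))
                      ((x0, y0, x1, y1), u.set k true, m)).1.2.2.1,
                    (pvInnerA grupos tol (List.range' (k + 1) (grupos.length - (k + 1)))
                      ((x0, y0, x1, y1), u.set k true, m)).1.2.2.2, mt)],
           (pvInnerA grupos tol (List.range' (k + 1) (grupos.length - (k + 1)))
                      ((x0, y0, x1, y1), u.set k true, m)).2) := by
        simp [pvStepA, hused', hg]
      have hc : grupos.length - (k + 1) = c := by omega
      rw [hstep, hc]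
      have hnd : (List.range' (k + 1) c).Nodup := List.nodup_range'
      have hlt : ∀ j ∈ List.range' (k + 1) c, j < (u.set k true).length := by
        intro j hjm
        rw [List.mem_range'_1] at hjm
        simp only [List.length_set]
        omega
      have hnotmem : k ∉ List.range' (k + 1) c := by
        intro hmem; rw [List.mem_range'_1] at hmem; omega
      have hsel1 : pvSel grupos (u.set k true) (List.range' (k + 1) c) = pvSel grupos u (List.range' (k + 1) c) :=
        pvSel_set_of_not_mem grupos u k true _ hnotmem
      have hinner := pvInnerA_eq grupos tol (List.range' (k + 1) c) (x0, y0, x1, y1) (u.set k true) m hnd hlt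
      rw [hsel1] at hinner
      set r := pvInnerA grupos tol (List.range' (k + 1) c) ((x0, y0, x1, y1), u.set k true, m) with hr
      set L := pvSel grupos u (List.range' (k + 1) c) with hL
      set q := pvAbsorb tol (x0, y0, x1, y1) L with hq
      have hrlen : r.2.1.length = grupos.length := by
        rw [hinner.1]; simpa using hu
      have hih := ih (k + 1) (acc ++ [(r.1.1, r.1.2.1, r.1.2.2.1, r.1.2.2.2, mt)]) r.2.1 r.2.2
        (by omega) hrlen
      have hselS : pvSel grupos u (k :: List.range' (k + 1) c) = (x0, y0, x1, y1, mt) :: L := by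
        simp [pvSel, hused', hg, hL]
      have hpass : pvPassAbs tol (pvSel grupos u (k :: List.range' (k + 1) c)) =
          (q.1.1, q.1.2.1, q.1.2.2.1, q.1.2.2.2, mt) :: pvPassAbs tol q.2 := by
        rw [hselS, pvPassAbs]
      constructor
      · rw [hih.1, hinner.2.2.2.2, hpass, List.append_assoc]
        simp [hinner.2.1]
      · rw [hih.2, hinner.2.2.2.2, hinner.2.2.1, hpass, hselS]
        simp only [List.length_cons, Bool.or_assoc]
        congr 1
        have h1 := pvPassAbs_len_le tol q.2
        have h2 := pvAbsorb_len tol L (x0, y0, x1, y1)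
        rw [← hq] at h2
        by_cases e1 : q.2.length = L.length <;>
          by_cases e2 : (pvPassAbs tol q.2).length = q.2.length <;>
            first
              | (simp [e1, e2]; omega)
              | simp [e1, e2]

lemma pvSel_replicate (grupos : List PVR) (js : List Nat) :
    pvSel grupos (List.replicate grupos.length false) js = js.filterMap (fun j => grupos[j]?) := by
  simp [pvSel]

lemma pvPassA_eq (grupos : List PVR) (tol : Int) :
    pvPassA grupos tol = (pvPassAbs tol grupos, decide ((pvPassAbs tol grupos).length ≠ grupos.length)) := by
  have h := pvFoldA_eq grupos tol grupos.length 0 [] (List.replicate grupos.length false) false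
    (by omega) (by simp)
  rw [pvSel_replicate, pvFilterMap_range'_getElem grupos grupos.length 0 (by omega), List.drop_zero] at h
  unfold pvPassA
  rw [← List.range_eq_range'] at h
  exact Prod.ext (by simpa using h.1) (by simpa using h.2)


-- Abstract-rewriting view shared by both programs: an elementary merge step fuses the
-- group at position q into the group at position p (p < q, boxes within tolerance).
-- The step is terminating (length drops) and has the diamond property, so the normal
-- form (no two boxes within tolerance) reachable from the input is unique; A's passes
-- and B's first-pair loop are both maximal sequences of such steps.

def pvM2 (a b : PVR) : PVR :=
  (min a.1 b.1, min a.2.1 b.2.1, max a.2.2.1 b.2.2.1, max a.2.2.2.1 b.2.2.2.1, a.2.2.2.2)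

def pvOvlP (tol : Int) (a b : PVR) : Bool :=
  pvOvl tol a.1 a.2.1 a.2.2.1 a.2.2.2.1 b.1 b.2.1 b.2.2.1 b.2.2.2.1

def pvStepR (tol : Int) (l l' : List PVR) : Prop :=
  ∃ p q a b, p < q ∧ l[p]? = some a ∧ l[q]? = some b ∧ pvOvlP tol a b = true ∧
    l' = (l.set p (pvM2 a b)).eraseIdx q

def pvNF (tol : Int) (l : List PVR) : Prop := ∀ l', ¬ pvStepR tol l l'

lemma pvOvlP_symm (tol : Int) (a b : PVR) (h : pvOvlP tol a b = true) : pvOvlP tol b a = true := by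
  simp only [pvOvlP, pvOvl, Bool.and_eq_true, decide_eq_true_eq] at h ⊢; omega

lemma pvOvlP_m2_left (tol : Int) (a b c : PVR) (h : pvOvlP tol a c = true) :
    pvOvlP tol (pvM2 a b) c = true := by
  simp only [pvOvlP, pvOvl, pvM2, Bool.and_eq_true, decide_eq_true_eq] at h ⊢
  omega

lemma pvOvlP_m2_right (tol : Int) (a b c : PVR) (h : pvOvlP tol b c = true) :
    pvOvlP tol (pvM2 a b) c = true := by
  simp only [pvOvlP, pvOvl, pvM2, Bool.and_eq_true, decide_eq_true_eq] at h ⊢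
  omega

lemma pvM2_assoc (a b c : PVR) : pvM2 (pvM2 a b) c = pvM2 a (pvM2 b c) := by
  simp only [pvM2, min_assoc, max_assoc]

lemma pvM2_rot (a b c : PVR) : pvM2 (pvM2 a b) c = pvM2 (pvM2 a c) b := by
  simp only [pvM2]
  rw [min_right_comm a.1, min_right_comm a.2.1, max_right_comm a.2.2.1, max_right_comm a.2.2.2.1]

lemma pvStepR_len (tol : Int) (l l' : List PVR) (h : pvStepR tol l l') :
    l'.length + 1 = l.length := by
  obtain ⟨p, q, a, b, hpq, hp, hq, hov, rfl⟩ := h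
  have hql : q < l.length := (List.getElem?_eq_some_iff.mp hq).1
  simp only [List.length_eraseIdx, List.length_set, if_pos hql]
  omega

-- getElem? characterisation of an elementary merge
lemma pvMrg_get (l : List PVR) (p q : Nat) (v : PVR) (hpq : p < q) (hq : q < l.length) (k : Nat) :
    ((l.set p v).eraseIdx q)[k]? =
      if k < q then (if k = p then some v else l[k]?) else l[k + 1]? := by
  have hp : p < l.length := lt_trans hpq hq
  rw [List.getElem?_eraseIdx, List.getElem?_set, List.getElem?_set]
  by_cases hk : k < q
  · by_cases hkp : k = p
    · simp [hkp, hp]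
    · have h2 : p ≠ k := fun h => hkp h.symm
      simp [hk, h2, hkp]
  · have : p ≠ k + 1 := by omega
    simp [hk, this]

-- list-surgery helpers
lemma pvCtx_set (P : List PVR) (t : List PVR) (c v : PVR) :
    (P ++ c :: t).set P.length v = P ++ v :: t := by
  induction P with
  | nil => rfl
  | cons p P ih => simp [ih]

lemma pvCtx_erase (P : List PVR) (t : List PVR) (g : PVR) :
    (P ++ g :: t).eraseIdx P.length = P ++ t := by
  induction P with
  | nil => rfl
  | cons p P ih => simp [ih]

lemma pvErase_set_comm (l : List PVR) (i j : Nat) (v : PVR) (hij : i < j) :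
    (l.eraseIdx j).set i v = (l.set i v).eraseIdx j := by
  apply List.ext_getElem?
  intro k
  simp only [List.getElem?_eraseIdx, List.getElem?_set, List.length_eraseIdx]
  split_ifs <;> first | rfl | omega

lemma pvNF_nil (tol : Int) : pvNF tol [] := by
  intro l' hstep
  obtain ⟨p, q, a, b, hpq, hp, hq, hov, _⟩ := hstep
  simp at hp

lemma pvM2_inner_comm (a b c : PVR) : pvM2 a (pvM2 b c) = pvM2 a (pvM2 c b) := by
  simp only [pvM2]
  rw [min_comm b.1, min_comm b.2.1, max_comm b.2.2.1, max_comm b.2.2.2.1]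

lemma pvMrg_len (l : List PVR) (p q : Nat) (v : PVR) (hq : q < l.length) :
    ((l.set p v).eraseIdx q).length = l.length - 1 := by
  simp [List.length_eraseIdx, List.length_set, hq]


-- the diamond property
lemma pvStepR_diamond_aux (tol : Int) (l : List PVR) (p q r s : Nat) (a b c e : PVR)
    (hpq : p < q) (hp : l[p]? = some a) (hq : l[q]? = some b) (hab : pvOvlP tol a b = true)
    (hrs : r < s) (hr : l[r]? = some c) (hs : l[s]? = some e) (hce : pvOvlP tol c e = true)
    (hlex : p < r ∨ (p = r ∧ q < s)) :
    ∃ d, pvStepR tol ((l.set p (pvM2 a b)).eraseIdx q) d ∧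
         pvStepR tol ((l.set r (pvM2 c e)).eraseIdx s) d := by
  have hql : q < l.length := (List.getElem?_eq_some_iff.mp hq).1
  have hsl : s < l.length := (List.getElem?_eq_some_iff.mp hs).1
  have hpl : p < l.length := lt_trans hpq hql
  have hrl : r < l.length := lt_trans hrs hsl
  rcases hlex with hpr | ⟨heq, hqs⟩
  · -- p < r
    by_cases hsq : s = q
    · -- same victim (s = q): both seeds merged the same later box
      subst hsq
      have heb : b = e := by rw [hq] at hs; exact Option.some.inj hs
      subst heb
      refine ⟨((((l.set p (pvM2 a b)).eraseIdx s).set p (pvM2 (pvM2 a b) c)).eraseIdx r),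
        ⟨p, r, pvM2 a b, c, hpr, ?_, ?_, ?_, rfl⟩,
        ⟨p, r, a, pvM2 c b, hpr, ?_, ?_, ?_, ?_⟩⟩
      · rw [pvMrg_get l p s (pvM2 a b) hpq hsl p]; simp [hpq]
      · rw [pvMrg_get l p s (pvM2 a b) hpq hsl r, if_pos hrs, if_neg (by omega)]; exact hr
      · exact pvOvlP_m2_right tol a b c (pvOvlP_symm tol c b hce)
      · rw [pvMrg_get l r s (pvM2 c b) hrs hsl p, if_pos hpq, if_neg (by omega)]; exact hp
      · rw [pvMrg_get l r s (pvM2 c b) hrs hsl r]; simp [hrs]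
      · exact pvOvlP_symm tol (pvM2 c b) a
          (pvOvlP_m2_right tol c b a (pvOvlP_symm tol a b hab))
      · apply List.ext_getElem?
        intro k
        rw [pvMrg_get ((l.set p (pvM2 a b)).eraseIdx s) p r _ hpr
              (by rw [pvMrg_len l p s _ hsl]; omega) k,
            pvMrg_get ((l.set r (pvM2 c b)).eraseIdx s) p r _ hpr
              (by rw [pvMrg_len l r s _ hsl]; omega) k,
            pvMrg_get l p s (pvM2 a b) hpq hsl k, pvMrg_get l p s (pvM2 a b) hpq hsl (k + 1),
            pvMrg_get l r s (pvM2 c b) hrs hsl k, pvMrg_get l r s (pvM2 c b) hrs hsl (k + 1)]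
        have hid : pvM2 (pvM2 a b) c = pvM2 a (pvM2 c b) := by
          rw [pvM2_assoc, pvM2_inner_comm]
        split_ifs <;> first | rfl | omega | rw [hid]
    · by_cases hrq : r = q
      · -- chain (r = q): the second merge's seed is the first merge's victim
        subst hrq
        have hcb : b = c := by rw [hq] at hr; exact Option.some.inj hr
        subst hcb
        have hqs : r < s := hrs
        refine ⟨((((l.set p (pvM2 a b)).eraseIdx r).set p (pvM2 (pvM2 a b) e)).eraseIdx (s - 1)),
          ⟨p, s - 1, pvM2 a b, e, by omega, ?_, ?_, ?_, rfl⟩,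
          ⟨p, r, a, pvM2 b e, hpr, ?_, ?_, ?_, ?_⟩⟩
        · rw [pvMrg_get l p r (pvM2 a b) hpq hql p]; simp [hpq]
        · rw [pvMrg_get l p r (pvM2 a b) hpq hql (s - 1), if_neg (by omega),
              show s - 1 + 1 = s from by omega]; exact hs
        · exact pvOvlP_m2_right tol a b e hce
        · rw [pvMrg_get l r s (pvM2 b e) hrs hsl p, if_pos (by omega), if_neg (by omega)]; exact hp
        · rw [pvMrg_get l r s (pvM2 b e) hrs hsl r]; simp [hrs]
        · exact pvOvlP_symm tol (pvM2 b e) a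
            (pvOvlP_m2_left tol b e a (pvOvlP_symm tol a b hab))
        · apply List.ext_getElem?
          intro k
          rw [pvMrg_get ((l.set p (pvM2 a b)).eraseIdx r) p (s - 1) _ (by omega)
                (by rw [pvMrg_len l p r _ hql]; omega) k,
              pvMrg_get ((l.set r (pvM2 b e)).eraseIdx s) p r _ hpr
                (by rw [pvMrg_len l r s _ hsl]; omega) k,
              pvMrg_get l p r (pvM2 a b) hpq hql k, pvMrg_get l p r (pvM2 a b) hpq hql (k + 1),
              pvMrg_get l r s (pvM2 b e) hrs hsl k, pvMrg_get l r s (pvM2 b e) hrs hsl (k + 1)]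
          have hid : pvM2 (pvM2 a b) e = pvM2 a (pvM2 b e) := pvM2_assoc a b e
          split_ifs <;> first | rfl | omega | rw [hid]
      · -- disjoint pairs
        have hd : s < q ∨ (r < q ∧ q < s) ∨ (q < r) := by omega
        rcases hd with h1 | ⟨h2a, h2b⟩ | h3
        · -- p < r < s < q
          refine ⟨((((l.set p (pvM2 a b)).eraseIdx q).set r (pvM2 c e)).eraseIdx s),
            ⟨r, s, c, e, hrs, ?_, ?_, hce, rfl⟩,
            ⟨p, q - 1, a, b, by omega, ?_, ?_, hab, ?_⟩⟩
          · rw [pvMrg_get l p q (pvM2 a b) hpq hql r, if_pos (by omega), if_neg (by omega)]; exact hr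
          · rw [pvMrg_get l p q (pvM2 a b) hpq hql s, if_pos (by omega), if_neg (by omega)]; exact hs
          · rw [pvMrg_get l r s (pvM2 c e) hrs hsl p, if_pos (by omega), if_neg (by omega)]; exact hp
          · rw [pvMrg_get l r s (pvM2 c e) hrs hsl (q - 1), if_neg (by omega),
                show q - 1 + 1 = q from by omega]; exact hq
          · apply List.ext_getElem?
            intro k
            rw [pvMrg_get ((l.set p (pvM2 a b)).eraseIdx q) r s _ hrs
                  (by rw [pvMrg_len l p q _ hql]; omega) k,
                pvMrg_get ((l.set r (pvM2 c e)).eraseIdx s) p (q - 1) _ (by omega)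
                  (by rw [pvMrg_len l r s _ hsl]; omega) k,
                pvMrg_get l p q (pvM2 a b) hpq hql k, pvMrg_get l p q (pvM2 a b) hpq hql (k + 1),
                pvMrg_get l r s (pvM2 c e) hrs hsl k, pvMrg_get l r s (pvM2 c e) hrs hsl (k + 1)]
            split_ifs <;> first | rfl | omega
        · -- p < r < q < s
          refine ⟨((((l.set p (pvM2 a b)).eraseIdx q).set r (pvM2 c e)).eraseIdx (s - 1)),
            ⟨r, s - 1, c, e, by omega, ?_, ?_, hce, rfl⟩,
            ⟨p, q, a, b, hpq, ?_, ?_, hab, ?_⟩⟩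
          · rw [pvMrg_get l p q (pvM2 a b) hpq hql r, if_pos (by omega), if_neg (by omega)]; exact hr
          · rw [pvMrg_get l p q (pvM2 a b) hpq hql (s - 1), if_neg (by omega),
                show s - 1 + 1 = s from by omega]; exact hs
          · rw [pvMrg_get l r s (pvM2 c e) hrs hsl p, if_pos (by omega), if_neg (by omega)]; exact hp
          · rw [pvMrg_get l r s (pvM2 c e) hrs hsl q, if_pos (by omega), if_neg (by omega)]; exact hq
          · apply List.ext_getElem?
            intro k
            rw [pvMrg_get ((l.set p (pvM2 a b)).eraseIdx q) r (s - 1) _ (by omega)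
                  (by rw [pvMrg_len l p q _ hql]; omega) k,
                pvMrg_get ((l.set r (pvM2 c e)).eraseIdx s) p q _ hpq
                  (by rw [pvMrg_len l r s _ hsl]; omega) k,
                pvMrg_get l p q (pvM2 a b) hpq hql k, pvMrg_get l p q (pvM2 a b) hpq hql (k + 1),
                pvMrg_get l r s (pvM2 c e) hrs hsl k, pvMrg_get l r s (pvM2 c e) hrs hsl (k + 1)]
            split_ifs <;> first | rfl | omega
        · -- p < q < r < s
          refine ⟨((((l.set p (pvM2 a b)).eraseIdx q).set (r - 1) (pvM2 c e)).eraseIdx (s - 1)),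
            ⟨r - 1, s - 1, c, e, by omega, ?_, ?_, hce, rfl⟩,
            ⟨p, q, a, b, hpq, ?_, ?_, hab, ?_⟩⟩
          · rw [pvMrg_get l p q (pvM2 a b) hpq hql (r - 1), if_neg (by omega),
                show r - 1 + 1 = r from by omega]; exact hr
          · rw [pvMrg_get l p q (pvM2 a b) hpq hql (s - 1), if_neg (by omega),
                show s - 1 + 1 = s from by omega]; exact hs
          · rw [pvMrg_get l r s (pvM2 c e) hrs hsl p, if_pos (by omega), if_neg (by omega)]; exact hp
          · rw [pvMrg_get l r s (pvM2 c e) hrs hsl q, if_pos (by omega), if_neg (by omega)]; exact hq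
          · apply List.ext_getElem?
            intro k
            rw [pvMrg_get ((l.set p (pvM2 a b)).eraseIdx q) (r - 1) (s - 1) _ (by omega)
                  (by rw [pvMrg_len l p q _ hql]; omega) k,
                pvMrg_get ((l.set r (pvM2 c e)).eraseIdx s) p q _ hpq
                  (by rw [pvMrg_len l r s _ hsl]; omega) k,
                pvMrg_get l p q (pvM2 a b) hpq hql k, pvMrg_get l p q (pvM2 a b) hpq hql (k + 1),
                pvMrg_get l r s (pvM2 c e) hrs hsl k, pvMrg_get l r s (pvM2 c e) hrs hsl (k + 1)]
            split_ifs <;> first | rfl | omega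
  · -- same seed (p = r), q < s
    subst heq
    have hca : a = c := by rw [hp] at hr; exact Option.some.inj hr
    subst hca
    refine ⟨((((l.set p (pvM2 a b)).eraseIdx q).set p (pvM2 (pvM2 a b) e)).eraseIdx (s - 1)),
      ⟨p, s - 1, pvM2 a b, e, by omega, ?_, ?_, ?_, rfl⟩,
      ⟨p, q, pvM2 a e, b, hpq, ?_, ?_, ?_, ?_⟩⟩
    · rw [pvMrg_get l p q (pvM2 a b) hpq hql p]; simp [hpq]
    · rw [pvMrg_get l p q (pvM2 a b) hpq hql (s - 1), if_neg (by omega),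
          show s - 1 + 1 = s from by omega]; exact hs
    · exact pvOvlP_m2_left tol a b e hce
    · rw [pvMrg_get l p s (pvM2 a e) hrs hsl p]; simp [hrs]
    · rw [pvMrg_get l p s (pvM2 a e) hrs hsl q, if_pos hqs, if_neg (by omega)]; exact hq
    · exact pvOvlP_m2_left tol a e b hab
    · apply List.ext_getElem?
      intro k
      rw [pvMrg_get ((l.set p (pvM2 a b)).eraseIdx q) p (s - 1) _ (by omega)
            (by rw [pvMrg_len l p q _ hql]; omega) k,
          pvMrg_get ((l.set p (pvM2 a e)).eraseIdx s) p q _ hpq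
            (by rw [pvMrg_len l p s _ hsl]; omega) k,
          pvMrg_get l p q (pvM2 a b) hpq hql k, pvMrg_get l p q (pvM2 a b) hpq hql (k + 1),
          pvMrg_get l p s (pvM2 a e) hrs hsl k, pvMrg_get l p s (pvM2 a e) hrs hsl (k + 1)]
      split_ifs <;> first | rfl | omega | rw [pvM2_rot]

lemma pvStepR_diamond (tol : Int) (l x y : List PVR)
    (hx : pvStepR tol l x) (hy : pvStepR tol l y) :
    x = y ∨ ∃ d, pvStepR tol x d ∧ pvStepR tol y d := by
  obtain ⟨p, q, a, b, hpq, hp, hq, hab, rfl⟩ := hx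
  obtain ⟨r, s, c, e, hrs, hr, hs, hce, rfl⟩ := hy
  by_cases heq : p = r ∧ q = s
  · obtain ⟨rfl, rfl⟩ := heq
    left
    rw [hp] at hr
    rw [hq] at hs
    obtain rfl := Option.some.inj hr
    obtain rfl := Option.some.inj hs
    rfl
  · have hlex : (p < r ∨ (p = r ∧ q < s)) ∨ (r < p ∨ (r = p ∧ s < q)) := by omega
    rcases hlex with h1 | h2
    · exact Or.inr (pvStepR_diamond_aux tol l p q r s a b c e hpq hp hq hab hrs hr hs hce h1)
    · obtain ⟨d, hd1, hd2⟩ :=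
        pvStepR_diamond_aux tol l r s p q c e a b hrs hr hs hce hpq hp hq hab h2
      exact Or.inr ⟨d, hd2, hd1⟩


-- reaching a normal form is deterministic
lemma pvStepR_nf_reach (tol : Int) :
    ∀ (l a d : List PVR), Relation.ReflTransGen (pvStepR tol) l a → pvNF tol a →
      pvStepR tol l d → Relation.ReflTransGen (pvStepR tol) d a := by
  intro l
  induction hn : l.length using Nat.strong_induction_on generalizing l with
  | _ n ih =>
    intro a d hra hnf hd
    rcases Relation.ReflTransGen.cases_head hra with rfl | ⟨c, hc, hca⟩
    · exact absurd hd (hnf d)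
    · rcases pvStepR_diamond tol l d c hd hc with heq | ⟨e, hde, hce⟩
      · rw [heq]; exact hca
      · have hlc := pvStepR_len tol l c hc
        exact Relation.ReflTransGen.head hde (ih c.length (by omega) c rfl a e hca hnf hce)

lemma pvStepR_nf_unique (tol : Int) :
    ∀ (l a b : List PVR), Relation.ReflTransGen (pvStepR tol) l a → pvNF tol a →
      Relation.ReflTransGen (pvStepR tol) l b → pvNF tol b → a = b := by
  intro l
  induction hn : l.length using Nat.strong_induction_on generalizing l with
  | _ n ih =>
    intro a b hra hnfa hrb hnfb
    rcases Relation.ReflTransGen.cases_head hra with rfl | ⟨c, hc, hca⟩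
    · rcases Relation.ReflTransGen.cases_head hrb with rfl | ⟨c, hc, _⟩
      · rfl
      · exact absurd hc (hnfa c)
    · have hcb := pvStepR_nf_reach tol l b c hrb hnfb hc
      have hlc := pvStepR_len tol l c hc
      exact ih c.length (by omega) c rfl a b hca hnfa hcb hnfb

-- ---- A's loop is a maximal sequence of merge steps ----
lemma pvAbsorb_steps (tol : Int) :
    ∀ (rest : List PVR) (b : Int × Int × Int × Int) (mt : List (String × String)) (P mid : List PVR),
      Relation.ReflTransGen (pvStepR tol)
        (P ++ (b.1, b.2.1, b.2.2.1, b.2.2.2, mt) :: (mid ++ rest))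
        (P ++ ((pvAbsorb tol b rest).1.1, (pvAbsorb tol b rest).1.2.1,
               (pvAbsorb tol b rest).1.2.2.1, (pvAbsorb tol b rest).1.2.2.2, mt)
           :: (mid ++ (pvAbsorb tol b rest).2)) := by
  intro rest
  induction rest with
  | nil => intro b mt P mid; simp only [pvAbsorb]; exact Relation.ReflTransGen.refl
  | cons g rest ih =>
    intro b mt P mid
    obtain ⟨x0, y0, x1, y1⟩ := b
    obtain ⟨gx0, gy0, gx1, gy1, mg⟩ := g
    by_cases hov : pvOvl tol x0 y0 x1 y1 gx0 gy0 gx1 gy1 = true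
    · -- one elementary merge step, then continue with the grown box
      rw [show pvAbsorb tol (x0, y0, x1, y1) ((gx0, gy0, gx1, gy1, mg) :: rest)
            = pvAbsorb tol (min x0 gx0, min y0 gy0, max x1 gx1, max y1 gy1) rest by
          simp [pvAbsorb, hov]]
      have hstep : pvStepR tol
          (P ++ (x0, y0, x1, y1, mt) :: (mid ++ (gx0, gy0, gx1, gy1, mg) :: rest))
          (P ++ (min x0 gx0, min y0 gy0, max x1 gx1, max y1 gy1, mt) :: (mid ++ rest)) := by
        refine ⟨P.length, P.length + 1 + mid.length, (x0, y0, x1, y1, mt),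
          (gx0, gy0, gx1, gy1, mg), by omega, ?_, ?_, ?_, ?_⟩
        · rw [List.getElem?_append_right (le_refl P.length)]
          simp
        · rw [List.getElem?_append_right (by omega : P.length ≤ P.length + 1 + mid.length)]
          have : P.length + 1 + mid.length - P.length = mid.length + 1 := by omega
          rw [this, List.getElem?_cons_succ,
              List.getElem?_append_right (le_refl mid.length)]
          simp
        · simp only [pvOvlP]; exact hov
        · rw [pvCtx_set]
          have hre : P ++ pvM2 (x0, y0, x1, y1, mt) (gx0, gy0, gx1, gy1, mg)
                :: (mid ++ (gx0, gy0, gx1, gy1, mg) :: rest)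
              = (P ++ pvM2 (x0, y0, x1, y1, mt) (gx0, gy0, gx1, gy1, mg) :: mid)
                ++ (gx0, gy0, gx1, gy1, mg) :: rest := by simp
          rw [hre, show P.length + 1 + mid.length
                = (P ++ pvM2 (x0, y0, x1, y1, mt) (gx0, gy0, gx1, gy1, mg) :: mid).length by
              simp; omega,
            pvCtx_erase]
          simp [pvM2]
      exact Relation.ReflTransGen.head hstep
        (ih (min x0 gx0, min y0 gy0, max x1 gx1, max y1 gy1) mt P mid)
    · -- not absorbed: the element joins the kept middle section
      rw [show pvAbsorb tol (x0, y0, x1, y1) ((gx0, gy0, gx1, gy1, mg) :: rest)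
            = ((pvAbsorb tol (x0, y0, x1, y1) rest).1,
               (gx0, gy0, gx1, gy1, mg) :: (pvAbsorb tol (x0, y0, x1, y1) rest).2) by
          simp [pvAbsorb, hov]]
      have := ih (x0, y0, x1, y1) mt P (mid ++ [(gx0, gy0, gx1, gy1, mg)])
      simpa using this

lemma pvPassAbs_steps (tol : Int) :
    ∀ (gs P : List PVR),
      Relation.ReflTransGen (pvStepR tol) (P ++ gs) (P ++ pvPassAbs tol gs) := by
  intro gs
  induction hn : gs.length using Nat.strong_induction_on generalizing gs with
  | _ n ih =>
    intro P
    match gs with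
    | [] => simp only [pvPassAbs, List.append_nil]; exact Relation.ReflTransGen.refl
    | (x0, y0, x1, y1, mt) :: rest =>
      rw [pvPassAbs]
      have h1 := pvAbsorb_steps tol rest (x0, y0, x1, y1) mt P []
      simp only [List.nil_append] at h1
      have hlen := pvAbsorb_len tol rest (x0, y0, x1, y1)
      have h2 := ih ((pvAbsorb tol (x0, y0, x1, y1) rest).2.length)
        (by simp only [List.length_cons] at hn; omega)
        (pvAbsorb tol (x0, y0, x1, y1) rest).2 rfl
        (P ++ [((pvAbsorb tol (x0, y0, x1, y1) rest).1.1,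
                (pvAbsorb tol (x0, y0, x1, y1) rest).1.2.1,
                (pvAbsorb tol (x0, y0, x1, y1) rest).1.2.2.1,
                (pvAbsorb tol (x0, y0, x1, y1) rest).1.2.2.2, mt)])
      simp only [List.append_assoc, List.singleton_append] at h2
      exact Relation.ReflTransGen.trans h1 h2

lemma pvAbsorb_stable (tol : Int) :
    ∀ (rest : List PVR) (b : Int × Int × Int × Int),
      (pvAbsorb tol b rest).2.length = rest.length →
      pvAbsorb tol b rest = (b, rest) ∧
        ∀ g ∈ rest, pvOvl tol b.1 b.2.1 b.2.2.1 b.2.2.2 g.1 g.2.1 g.2.2.1 g.2.2.2.1 = false := by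
  intro rest
  induction rest with
  | nil => intro b _; simp [pvAbsorb]
  | cons g rest ih =>
    intro b hlen
    obtain ⟨x0, y0, x1, y1⟩ := b
    obtain ⟨gx0, gy0, gx1, gy1, mg⟩ := g
    by_cases hov : pvOvl tol x0 y0 x1 y1 gx0 gy0 gx1 gy1 = true
    · exfalso
      rw [show pvAbsorb tol (x0, y0, x1, y1) ((gx0, gy0, gx1, gy1, mg) :: rest)
            = pvAbsorb tol (min x0 gx0, min y0 gy0, max x1 gx1, max y1 gy1) rest by
          simp [pvAbsorb, hov]] at hlen
      have := pvAbsorb_len tol rest (min x0 gx0, min y0 gy0, max x1 gx1, max y1 gy1)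
      simp only [List.length_cons] at hlen
      omega
    · rw [show pvAbsorb tol (x0, y0, x1, y1) ((gx0, gy0, gx1, gy1, mg) :: rest)
            = ((pvAbsorb tol (x0, y0, x1, y1) rest).1,
               (gx0, gy0, gx1, gy1, mg) :: (pvAbsorb tol (x0, y0, x1, y1) rest).2) by
          simp [pvAbsorb, hov]] at hlen ⊢
      simp only [List.length_cons, Nat.add_right_cancel_iff] at hlen
      obtain ⟨heq, hall⟩ := ih (x0, y0, x1, y1) hlen
      rw [Bool.not_eq_true] at hov
      refine ⟨by rw [heq], ?_⟩
      intro g' hg'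
      rcases List.mem_cons.mp hg' with rfl | hmem
      · exact hov
      · exact hall g' hmem

lemma pvNF_cons (tol : Int) (x : PVR) (rest : List PVR)
    (hhead : ∀ g ∈ rest, pvOvlP tol x g = false) (htail : pvNF tol rest) :
    pvNF tol (x :: rest) := by
  intro l' hstep
  obtain ⟨p, q, a, b, hpq, hp, hq, hov, _⟩ := hstep
  match p, hpq with
  | 0, _ =>
    obtain ⟨q', rfl⟩ : ∃ q', q = q' + 1 := ⟨q - 1, by omega⟩
    rw [List.getElem?_cons_succ] at hq
    simp only [List.getElem?_cons_zero, Option.some.injEq] at hp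
    subst hp
    rw [hhead b (List.mem_of_getElem? hq)] at hov
    exact absurd hov (by simp)
  | (p' + 1), _ =>
    obtain ⟨q', rfl⟩ : ∃ q', q = q' + 1 := ⟨q - 1, by omega⟩
    rw [List.getElem?_cons_succ] at hp hq
    exact htail _ ⟨p', q', a, b, by omega, hp, hq, hov, rfl⟩

lemma pvPassAbs_stable_nf (tol : Int) :
    ∀ (gs : List PVR), (pvPassAbs tol gs).length = gs.length →
      pvPassAbs tol gs = gs ∧ pvNF tol gs := by
  intro gs
  induction hn : gs.length using Nat.strong_induction_on generalizing gs with
  | _ n ih =>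
    match gs with
    | [] => intro _; exact ⟨by simp [pvPassAbs], pvNF_nil tol⟩
    | (x0, y0, x1, y1, mt) :: rest =>
      intro hlen
      rw [pvPassAbs] at hlen ⊢
      simp only [List.length_cons] at hlen
      have h1 := pvAbsorb_len tol rest (x0, y0, x1, y1)
      have h2 := pvPassAbs_len_le tol (pvAbsorb tol (x0, y0, x1, y1) rest).2
      have hrn : rest.length + 1 = n := by simpa using hn
      have hkl : (pvAbsorb tol (x0, y0, x1, y1) rest).2.length = rest.length := by omega
      obtain ⟨habs, hall⟩ := pvAbsorb_stable tol rest (x0, y0, x1, y1) hkl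
      have hpl : (pvPassAbs tol (pvAbsorb tol (x0, y0, x1, y1) rest).2).length
          = (pvAbsorb tol (x0, y0, x1, y1) rest).2.length := by omega
      obtain ⟨hpass, hnf⟩ := ih ((pvAbsorb tol (x0, y0, x1, y1) rest).2.length)
        (by simp only [List.length_cons] at hn; omega) _ rfl hpl
      rw [habs] at hpass hnf ⊢
      simp only at hpass hnf
      refine ⟨by simp [hpass], ?_⟩
      apply pvNF_cons
      · intro g hg
        simp only [pvOvlP]
        exact hall g hg
      · exact hnf

lemma pvLoopA_reaches (tol : Int) :
    ∀ (g : List PVR), Relation.ReflTransGen (pvStepR tol) g (pvLoopA tol g) ∧ pvNF tol (pvLoopA tol g) := by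
  intro g
  induction hn : g.length using Nat.strong_induction_on generalizing g with
  | _ n ih =>
    rw [pvLoopA]
    by_cases h : (pvPassA g tol).2 = true
    · simp only [h, dite_true]
      have hsteps := pvPassAbs_steps tol g []
      simp only [List.nil_append] at hsteps
      have hlt := pvPassA_mudou_lt g tol h
      have h1 : (pvPassA g tol).1 = pvPassAbs tol g := by rw [pvPassA_eq]
      obtain ⟨hr, hnf⟩ := ih ((pvPassA g tol).1.length) (by omega) _ rfl
      rw [h1] at hr hnf ⊢
      exact ⟨Relation.ReflTransGen.trans hsteps hr, hnf⟩
    · simp only [h, dite_false]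
      have h1 : (pvPassA g tol).1 = pvPassAbs tol g := by rw [pvPassA_eq]
      have h2 : (pvPassAbs tol g).length = g.length := by
        rw [pvPassA_eq] at h
        simpa using h
      obtain ⟨hpass, hnf⟩ := pvPassAbs_stable_nf tol g h2
      rw [h1, hpass]
      exact ⟨Relation.ReflTransGen.refl, hnf⟩

-- ---- B's loop is a maximal sequence of merge steps ----
lemma pvFindJ_none (tol : Int) (l : List PVR) (x0 y0 x1 y1 : Int) :
    ∀ (j : Nat), pvFindJ tol l x0 y0 x1 y1 j = none →
      ∀ k, j ≤ k → k < l.length →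
        pvOvl tol x0 y0 x1 y1 l[k]!.1 l[k]!.2.1 l[k]!.2.2.1 l[k]!.2.2.2.1 = false := by
  intro j
  induction hn : l.length - j using Nat.strong_induction_on generalizing j with
  | _ n ih =>
    intro hnone k hjk hk
    rw [pvFindJ] at hnone
    by_cases h : j < l.length
    · rw [dif_pos h] at hnone
      by_cases hov : pvOvl tol x0 y0 x1 y1 l[j].1 l[j].2.1 l[j].2.2.1 l[j].2.2.2.1 = true
      · simp [hov] at hnone
      · simp only [hov] at hnone
        rcases Nat.eq_or_lt_of_le hjk with heq | hlt
        · subst heq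
          rw [Bool.not_eq_true] at hov
          rw [getElem!_pos l j h]
          exact hov
        · exact ih (l.length - (j + 1)) (by omega) (j + 1) rfl hnone k (by omega) hk
    · omega

lemma pvFindI_none (tol : Int) (l : List PVR) :
    ∀ (i : Nat), pvFindI tol l i = none →
      ∀ p q, i ≤ p → p < q → q < l.length → pvOvlP tol l[p]! l[q]! = false := by
  intro i
  induction hn : l.length - i using Nat.strong_induction_on generalizing i with
  | _ n ih =>
    intro hnone p q hip hpq hq
    rw [pvFindI] at hnone
    by_cases h : i < l.length
    · rw [dif_pos h] at hnone
      rcases hj : pvFindJ tol l l[i].1 l[i].2.1 l[i].2.2.1 l[i].2.2.2.1 (i + 1) with _ | j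
      · rw [hj] at hnone
        rcases Nat.eq_or_lt_of_le hip with heq | hlt
        · subst heq
          have := pvFindJ_none tol l l[i].1 l[i].2.1 l[i].2.2.1 l[i].2.2.2.1 (i + 1) hj q (by omega) hq
          simp only [pvOvlP]
          rw [getElem!_pos l i h]
          exact this
        · exact ih (l.length - (i + 1)) (by omega) (i + 1) rfl hnone p q (by omega) hpq hq
      · rw [hj] at hnone; exact absurd hnone (by simp)
    · omega

lemma pvFindJ_some_ovl (tol : Int) (l : List PVR) (x0 y0 x1 y1 : Int) :
    ∀ (j j' : Nat), pvFindJ tol l x0 y0 x1 y1 j = some j' →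
      ∃ b, l[j']? = some b ∧ pvOvl tol x0 y0 x1 y1 b.1 b.2.1 b.2.2.1 b.2.2.2.1 = true := by
  intro j
  induction hn : l.length - j using Nat.strong_induction_on generalizing j with
  | _ n ih =>
    intro j' hfind
    rw [pvFindJ] at hfind
    by_cases h : j < l.length
    · rw [dif_pos h] at hfind
      by_cases hov : pvOvl tol x0 y0 x1 y1 l[j].1 l[j].2.1 l[j].2.2.1 l[j].2.2.2.1 = true
      · simp only [hov, if_true, Option.some.injEq] at hfind
        subst hfind
        exact ⟨l[j], List.getElem?_eq_getElem h, hov⟩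
      · simp only [hov] at hfind
        exact ih (l.length - (j + 1)) (by omega) (j + 1) rfl j' hfind
    · rw [dif_neg h] at hfind; exact absurd hfind (by simp)

lemma pvFindI_some_ovl (tol : Int) (l : List PVR) :
    ∀ (i i' j' : Nat), pvFindI tol l i = some (i', j') →
      ∃ a b, l[i']? = some a ∧ l[j']? = some b ∧ pvOvlP tol a b = true := by
  intro i
  induction hn : l.length - i using Nat.strong_induction_on generalizing i with
  | _ n ih =>
    intro i' j' hfind
    rw [pvFindI] at hfind
    by_cases h : i < l.length
    · rw [dif_pos h] at hfind
      rcases hj : pvFindJ tol l l[i].1 l[i].2.1 l[i].2.2.1 l[i].2.2.2.1 (i + 1) with _ | j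
      · rw [hj] at hfind
        exact ih (l.length - (i + 1)) (by omega) (i + 1) rfl i' j' hfind
      · rw [hj] at hfind
        simp only [Option.some.injEq, Prod.mk.injEq] at hfind
        obtain ⟨rfl, rfl⟩ := hfind
        obtain ⟨b, hb, hovb⟩ := pvFindJ_some_ovl tol l l[i].1 l[i].2.1 l[i].2.2.1 l[i].2.2.2.1 (i + 1) j hj
        exact ⟨l[i], b, List.getElem?_eq_getElem h, hb, hovb⟩
    · rw [dif_neg h] at hfind; exact absurd hfind (by simp)

lemma pvLoopB_reaches (tol : Int) :
    ∀ (g : List PVR), Relation.ReflTransGen (pvStepR tol) g (pvLoopB tol g) ∧ pvNF tol (pvLoopB tol g) := by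
  intro g
  induction hn : g.length using Nat.strong_induction_on generalizing g with
  | _ n ih =>
    rw [pvLoopB]
    split
    · -- no overlapping pair: g is a normal form
      rename_i hfo
      refine ⟨Relation.ReflTransGen.refl, ?_⟩
      intro l' hstep
      obtain ⟨p, q, a, b, hpq, hp, hq, hov, _⟩ := hstep
      have hql : q < g.length := (List.getElem?_eq_some_iff.mp hq).1
      have hpl : p < g.length := lt_trans hpq hql
      have hno := pvFindI_none tol g 0 hfo p q (Nat.zero_le _) hpq hql
      rw [getElem!_pos g p hpl, getElem!_pos g q hql] at hno
      rw [List.getElem?_eq_getElem hpl, Option.some.injEq] at hp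
      rw [List.getElem?_eq_getElem hql, Option.some.injEq] at hq
      rw [hp, hq, hov] at hno
      exact absurd hno (by simp)
    · -- merge the found pair: one elementary step, then recurse
      rename_i i j hfo
      have hlt := pvFindI_some_lt tol g 0 i j hfo
      obtain ⟨a, b, ha, hb, hov⟩ := pvFindI_some_ovl tol g 0 i j hfo
      have ha' : g[i]?.getD (0, 0, 0, 0, []) = a := by rw [ha]; rfl
      have hb' : g[j]?.getD (0, 0, 0, 0, []) = b := by rw [hb]; rfl
      simp only [ha', hb']
      have hstep : pvStepR tol g ((g.eraseIdx j).set i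
          (min a.1 b.1, min a.2.1 b.2.1, max a.2.2.1 b.2.2.1, max a.2.2.2.1 b.2.2.2.1, a.2.2.2.2)) :=
        ⟨i, j, a, b, hlt.1, ha, hb, hov, pvErase_set_comm g i j (pvM2 a b) hlt.1⟩
      have hlen := pvStepR_len tol g ((g.eraseIdx j).set i
          (min a.1 b.1, min a.2.1 b.2.1, max a.2.2.1 b.2.2.1, max a.2.2.2.1 b.2.2.2.1, a.2.2.2.2)) hstep
      obtain ⟨hr, hnf⟩ := ih (((g.eraseIdx j).set i
          (min a.1 b.1, min a.2.1 b.2.1, max a.2.2.1 b.2.2.1, max a.2.2.2.1 b.2.2.2.1, a.2.2.2.2)).length)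
        (by omega) _ rfl
      exact ⟨Relation.ReflTransGen.head hstep hr, hnf⟩

-- ===== VERDICT (by name: the statement is the Claim_ definition above) =====
theorem agrupar_regioes_py_spec : Claim_equal_agrupar_regioes_py := by
  unfold Claim_equal_agrupar_regioes_py
  intro regioes_pt tolerancia _
  unfold Spec_agrupar_regioes_py agrupar_regioes_py agrupar_regioes_py_alt
  obtain ⟨hra, hna⟩ := pvLoopA_reaches tolerancia regioes_pt
  obtain ⟨hrb, hnb⟩ := pvLoopB_reaches tolerancia regioes_pt
  exact pvStepR_nf_unique tolerancia regioes_pt _ _ hra hna hrb hnb
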